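-- pv_equiv track=rewrite | github.com/neulab/ReviewAdvisor | tagger/helper/annotator_utils.py | contain_open_bracket
-- ===== SOURCE A (Python) =====
-- def contain_open_bracket(text: str):
--     has_open_bracket = False
--     for c in text:
--         if c == '(':
--             has_open_bracket = True
--         if has_open_bracket and c == ')':
--             has_open_bracket = False
--     return has_open_bracket
-- ===== SOURCE B (Python) =====
-- def contain_open_bracket(text: str):
--     return text.rfind('(') > text.rfind(')')
-- ===== Notes on version B (the rewrite author's own statement) =====
-- stated objective: simpler
-- what changed: Replaces the forward flag-tracking loop with a closed-form comparison of the last positions of the open and close parens via str.rfind: the flag ends up True exactly when the last open paren occurs after the last close paren.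
import Mathlib
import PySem

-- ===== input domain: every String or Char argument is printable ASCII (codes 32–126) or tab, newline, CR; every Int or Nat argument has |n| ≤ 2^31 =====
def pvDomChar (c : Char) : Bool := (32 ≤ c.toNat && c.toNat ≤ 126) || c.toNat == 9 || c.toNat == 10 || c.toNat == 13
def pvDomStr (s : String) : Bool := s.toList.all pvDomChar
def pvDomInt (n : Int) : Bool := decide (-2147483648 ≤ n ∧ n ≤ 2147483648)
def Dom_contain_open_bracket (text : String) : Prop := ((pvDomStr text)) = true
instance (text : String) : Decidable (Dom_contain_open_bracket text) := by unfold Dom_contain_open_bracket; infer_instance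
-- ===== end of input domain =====

-- B replaces A's forward flag-tracking loop with the closed form rfind('(') > rfind(')') (simpler).


-- ===== PORT A =====
-- literal transliteration of A's loop: flag set on '(', cleared by ')' when set
def contain_open_bracket (text : String) : Bool :=
  text.toList.foldl
    (fun has_open_bracket c =>
      let has_open_bracket := if c = '(' then true else has_open_bracket
      if has_open_bracket && c = ')' then false else has_open_bracket)
    false

-- ===== PORT B =====
def contain_open_bracket_alt (text : String) : Bool :=
  decide (PySem.Str.rfind text "(" > PySem.Str.rfind text ")")

-- ===== PRECONDITION & SPEC =====
def Spec_contain_open_bracket (text : String) (out : Bool) : Prop := out = contain_open_bracket_alt text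
instance (text : String) (out : Bool) : Decidable (Spec_contain_open_bracket text out) := by unfold Spec_contain_open_bracket; infer_instance

-- ===== CLAIM (what is proved, stated in full; the proofs are below) =====
def Claim_equal_contain_open_bracket : Prop := ∀ (text : String), Dom_contain_open_bracket text → Spec_contain_open_bracket text (contain_open_bracket text)

-- ===== LEMMAS AND PROOFS =====

-- go never exceeds its counter
theorem pv_go_le (s sub : List Char) : ∀ j : Nat, PySem.Chars.rfind.go s sub j ≤ (j : Int) := by
  intro j
  induction j with
  | zero => simp only [PySem.Chars.rfind.go]; split <;> simp
  | succ j ih =>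
    simp only [PySem.Chars.rfind.go]
    split
    · simp
    · exact le_trans ih (by exact_mod_cast Nat.le_succ j)

-- below l.length, appending one char does not change go for a single-char needle
theorem pv_go_append (l : List Char) (c d : Char) :
    ∀ j : Nat, j < l.length →
      PySem.Chars.rfind.go (l ++ [c]) [d] j = PySem.Chars.rfind.go l [d] j := by
  intro j
  induction j with
  | zero =>
    intro h
    simp only [PySem.Chars.rfind.go]
    obtain ⟨x, xs, rfl⟩ := List.exists_cons_of_ne_nil (List.ne_nil_of_length_pos h)
    simp [List.isPrefixOf]
  | succ j ih =>
    intro h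
    simp only [PySem.Chars.rfind.go]
    have hd : List.drop (j + 1) (l ++ [c]) = List.drop (j + 1) l ++ [c] :=
      List.drop_append_of_le_length (Nat.le_of_lt h)
    have hne : List.drop (j + 1) l ≠ [] := by
      simp [List.drop_eq_nil_iff]; omega
    obtain ⟨x, xs, hx⟩ := List.exists_cons_of_ne_nil hne
    rw [hd, hx]
    simp only [List.cons_append, List.isPrefixOf]
    split <;> simp_all [ih (Nat.lt_of_succ_lt h)]

-- rfind of a single char over an appended char
theorem pv_rfind_append (l : List Char) (c d : Char) :
    PySem.Chars.rfind (l ++ [c]) [d] =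
      if c = d then (l.length : Int) else PySem.Chars.rfind l [d] := by
  unfold PySem.Chars.rfind
  have hlen : (l ++ [c]).length = l.length + 1 := by simp
  rw [hlen]
  simp only [PySem.Chars.rfind.go]
  have h1 : List.drop (l.length + 1) (l ++ [c]) = [] := by simp
  rw [h1]
  simp only [List.isPrefixOf, if_false, Bool.false_eq_true]
  cases hl : l.length with
  | zero =>
    have : l = [] := List.eq_nil_of_length_eq_zero hl
    subst this
    simp only [PySem.Chars.rfind.go]
    simp [List.isPrefixOf, beq_iff_eq]
    split <;> rename_i h
    · simp [h]
    · have : ¬ c = d := fun hcd => h (by simp [hcd])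
      simp [this]
  | succ n =>
    simp only [PySem.Chars.rfind.go]
    have hdrop : List.drop (n + 1) (l ++ [c]) = [c] := by
      have : List.drop (n + 1) l = [] := by simp [List.drop_eq_nil_iff]; omega
      rw [List.drop_append_of_le_length (by omega), this]; simp
    rw [hdrop]
    have hdl : List.drop (n + 1) l = [] := by simp [List.drop_eq_nil_iff]; omega
    rw [hdl]
    simp only [List.isPrefixOf, Bool.and_true, beq_iff_eq]
    split <;> rename_i h
    · simp [h]
    · have : ¬ c = d := fun hcd => by simp [hcd] at h
      simp [this]
      exact pv_go_append l c d n (by omega)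

-- rfind of a single char is strictly below the length
theorem pv_rfind_lt (l : List Char) (d : Char) :
    PySem.Chars.rfind l [d] < (l.length : Int) := by
  unfold PySem.Chars.rfind
  cases hl : l.length with
  | zero =>
    have : l = [] := List.eq_nil_of_length_eq_zero hl
    subst this
    simp [PySem.Chars.rfind.go, List.isPrefixOf]
  | succ n =>
    simp only [PySem.Chars.rfind.go]
    have hdl : List.drop (n + 1) l = [] := by simp [List.drop_eq_nil_iff]; omega
    rw [hdl]
    simp only [List.isPrefixOf, if_false, Bool.false_eq_true]
    have := pv_go_le l [d] n
    push_cast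
    omega

-- the core equivalence over lists of characters
theorem pv_main (l : List Char) :
    l.foldl
      (fun has_open_bracket c =>
        let has_open_bracket := if c = '(' then true else has_open_bracket
        if has_open_bracket && c = ')' then false else has_open_bracket)
      false
    = decide (PySem.Chars.rfind l ['('] > PySem.Chars.rfind l [')']) := by
  induction l using List.reverseRecOn with
  | nil => simp [PySem.Chars.rfind, PySem.Chars.rfind.go, List.isPrefixOf]
  | append_singleton l c ih =>
    rw [List.foldl_append, ih]
    rw [pv_rfind_append, pv_rfind_append]
    by_cases hc1 : c = '('
    · have hc2 : ¬ c = ')' := by simp [hc1]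
      have := pv_rfind_lt l ')'
      simp only [List.foldl, hc1]
      simp
      omega
    · by_cases hc2 : c = ')'
      · have := pv_rfind_lt l '('
        simp only [List.foldl, hc2]
        simp
        omega
      · simp only [List.foldl, hc1, hc2, if_false]
        split <;> simp_all

-- ===== VERDICT (by name: the statement is the Claim_ definition above) =====
theorem contain_open_bracket_spec : Claim_equal_contain_open_bracket := by
  intro text _
  unfold Spec_contain_open_bracket contain_open_bracket contain_open_bracket_alt PySem.Str.rfind
  have h1 : ("(" : String).toList = ['('] := by decide
  have h2 : (")" : String).toList = [')'] := by decide
  rw [h1, h2]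
  exact pv_main text.toList
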